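-- pv_equiv track=rewrite | github.com/smartjourneymining/sequential-deep-learning-models | data_preprocessing.py | count_nb_traces_longer_than_prefix
-- ===== SOURCE A (Python) =====
-- def count_nb_traces_longer_than_prefix(trace_length_distributions, min_prefix=2, max_prefix=200, delete_zero_prefixes=True):
--     counts = {}
--
--     for log_name, log_distribution in trace_length_distributions.items():
--         counts[log_name] = {}
--         log_distribution = dict(sorted(log_distribution.items()))
--
--         for prefix in range(min_prefix, max_prefix):
--             counts[log_name][prefix] = 0
--             keys = log_distribution.keys()
--
--             for key in keys:
--                 if key > prefix:
--                     counts[log_name][prefix] += log_distribution[key]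
--
--     # delete zero-count prefixes:
--     if delete_zero_prefixes:
--         for log_name in counts.keys():
--             prefixes_to_delete =[]
--             for prefix in counts[log_name].keys():
--                 if counts[log_name][prefix] == 0: prefixes_to_delete.append(prefix)
--             for prefix in prefixes_to_delete:
--                 del counts[log_name][prefix]
--
--     return counts
-- ===== SOURCE B (Python) =====
-- def count_nb_traces_longer_than_prefix(trace_length_distributions, min_prefix=2, max_prefix=200, delete_zero_prefixes=True):
--     counts = {}
--     for log_name, dist in trace_length_distributions.items():
--         # number of traces longer than max_prefix - 1
--         acc = sum(v for k, v in dist.items() if k >= max_prefix)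
--         rev = []
--         # walk the prefixes downwards, maintaining acc = number of traces longer than p
--         for p in range(max_prefix - 1, min_prefix - 1, -1):
--             if not delete_zero_prefixes or acc != 0:
--                 rev.append((p, acc))
--             acc += dist.get(p, 0)
--         counts[log_name] = dict(reversed(rev))
--     return counts
-- ===== Notes on version B (the rewrite author's own statement) =====
-- stated objective: alternative
-- what changed: A rescans every trace-length key for each prefix and deletes zero entries in a separate pass; B walks the prefixes once in descending order keeping a running suffix-sum of trace counts, emitting (and optionally skipping zero) entries in one sweep.
import Mathlib
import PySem

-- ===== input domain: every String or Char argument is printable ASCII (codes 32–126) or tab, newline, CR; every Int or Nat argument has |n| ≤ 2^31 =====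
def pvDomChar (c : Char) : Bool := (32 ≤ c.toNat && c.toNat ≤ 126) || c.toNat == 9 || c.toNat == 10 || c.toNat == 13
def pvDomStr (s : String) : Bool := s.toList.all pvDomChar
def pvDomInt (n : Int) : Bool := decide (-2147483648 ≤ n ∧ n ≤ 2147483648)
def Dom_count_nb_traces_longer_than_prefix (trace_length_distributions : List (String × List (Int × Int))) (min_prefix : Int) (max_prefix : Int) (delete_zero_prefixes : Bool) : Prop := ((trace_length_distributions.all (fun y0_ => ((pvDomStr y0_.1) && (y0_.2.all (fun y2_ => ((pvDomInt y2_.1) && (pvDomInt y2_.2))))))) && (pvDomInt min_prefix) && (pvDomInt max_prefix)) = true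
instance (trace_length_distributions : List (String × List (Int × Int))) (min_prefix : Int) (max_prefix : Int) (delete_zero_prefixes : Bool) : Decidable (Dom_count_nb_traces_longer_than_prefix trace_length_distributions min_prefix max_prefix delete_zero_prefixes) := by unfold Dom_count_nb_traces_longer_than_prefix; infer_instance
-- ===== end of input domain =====

-- B replaces A's per-prefix rescan of the whole distribution by one descending sweep that
-- maintains a running suffix sum (objective: alternative single-pass algorithm); return values agree.

-- ===== PORT A =====
-- the inner 'for prefix … for key …' loops: counts[log_name][prefix] starts at 0 and is
-- accumulated into the dict entry, exactly as Python mutates counts[log_name][prefix]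
def pvA_inner (ld : PySem.Dict Int Int) (min_prefix max_prefix : Int) : PySem.Dict Int Int :=
  (PySem.List.pyRange min_prefix max_prefix 1).foldl
    (fun cd p =>
      ld.keys.foldl
        (fun cd k => if k > p then cd.insert p (cd.getD p 0 + ld.getD k 0) else cd)
        (cd.insert p 0))
    PySem.Dict.empty

-- the zero-prefix deletion pass on one log: collect zero-valued prefixes, then delete them
def pvA_delzero (cd : PySem.Dict Int Int) : PySem.Dict Int Int :=
  let dels := cd.keys.foldl (fun acc p => if cd.getD p 0 == 0 then acc ++ [p] else acc) []
  dels.foldl (fun d p => d.erase p) cd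

def count_nb_traces_longer_than_prefix (trace_length_distributions : List (String × List (Int × Int))) (min_prefix : Int) (max_prefix : Int) (delete_zero_prefixes : Bool) : List (String × List (Int × Int)) :=
  let tld := PySem.Dict.ofList trace_length_distributions
  let counts : PySem.Dict String (PySem.Dict Int Int) :=
    tld.items.foldl
      (fun counts it =>
        -- log_distribution = dict(sorted(log_distribution.items()))
        let ld := PySem.Dict.ofList
          (PySem.List.sorted2 (PySem.Dict.ofList it.2).items (fun q => q.1) (fun q => q.2))
        counts.insert it.1 (pvA_inner ld min_prefix max_prefix))
      PySem.Dict.empty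
  let counts :=
    if delete_zero_prefixes then
      counts.keys.foldl
        (fun c n => c.insert n (pvA_delzero (c.getD n PySem.Dict.empty)))
        counts
    else counts
  counts.items.map (fun q => (q.1, q.2.items))

-- ===== PORT B =====
-- one log: seed acc with the traces not shorter than max_prefix, then walk the prefixes
-- downwards keeping acc = number of traces longer than p; collected back-to-front
def pvB_log (d : PySem.Dict Int Int) (min_prefix max_prefix : Int) (delete_zero_prefixes : Bool) : List (Int × Int) :=
  let acc0 := ((d.items.filter (fun q => q.1 ≥ max_prefix)).map (fun q => q.2)).sum
  let st := (PySem.List.pyRange (max_prefix - 1) (min_prefix - 1) (-1)).foldl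
    (fun st p =>
      (if !delete_zero_prefixes || st.2 != 0 then st.1 ++ [(p, st.2)] else st.1,
       st.2 + d.getD p 0))
    (([] : List (Int × Int)), acc0)
  st.1.reverse

def count_nb_traces_longer_than_prefix_alt (trace_length_distributions : List (String × List (Int × Int))) (min_prefix : Int) (max_prefix : Int) (delete_zero_prefixes : Bool) : List (String × List (Int × Int)) :=
  let tld := PySem.Dict.ofList trace_length_distributions
  let counts : PySem.Dict String (PySem.Dict Int Int) :=
    tld.items.foldl
      (fun counts it =>
        counts.insert it.1
          (PySem.Dict.ofList (pvB_log (PySem.Dict.ofList it.2) min_prefix max_prefix delete_zero_prefixes)))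
      PySem.Dict.empty
  counts.items.map (fun q => (q.1, q.2.items))


-- ===== PRECONDITION & SPEC =====
def Spec_count_nb_traces_longer_than_prefix (trace_length_distributions : List (String × List (Int × Int))) (min_prefix : Int) (max_prefix : Int) (delete_zero_prefixes : Bool) (out : List (String × List (Int × Int))) : Prop := out = count_nb_traces_longer_than_prefix_alt trace_length_distributions min_prefix max_prefix delete_zero_prefixes
instance (trace_length_distributions : List (String × List (Int × Int))) (min_prefix : Int) (max_prefix : Int) (delete_zero_prefixes : Bool) (out : List (String × List (Int × Int))) : Decidable (Spec_count_nb_traces_longer_than_prefix trace_length_distributions min_prefix max_prefix delete_zero_prefixes out) := by unfold Spec_count_nb_traces_longer_than_prefix; infer_instance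

-- ===== CLAIM (what is proved, stated in full; the proofs are below) =====
def Claim_equal_count_nb_traces_longer_than_prefix : Prop := ∀ (trace_length_distributions : List (String × List (Int × Int))) (min_prefix : Int) (max_prefix : Int) (delete_zero_prefixes : Bool), Dom_count_nb_traces_longer_than_prefix trace_length_distributions min_prefix max_prefix delete_zero_prefixes → Spec_count_nb_traces_longer_than_prefix trace_length_distributions min_prefix max_prefix delete_zero_prefixes (count_nb_traces_longer_than_prefix trace_length_distributions min_prefix max_prefix delete_zero_prefixes)

-- ===== LEMMAS AND PROOFS =====

theorem pv_ofList_items {κ ν : Type} [BEq κ] [LawfulBEq κ] (l : List (κ × ν)) (h : (l.map Prod.fst).Nodup) :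
    (PySem.Dict.ofList l).items = l := by
  show (PySem.Dict.empty.update l).items = l
  rw [PySem.Dict.update]
  rw [PySem.Dict.items_foldl_insert_fresh l Prod.fst Prod.snd _ (fun a _ => PySem.Dict.contains_empty _) h]
  simp [PySem.Dict.empty]

theorem pv_erase_fold (ks : List Int) : ∀ (d : PySem.Dict Int Int),
    (ks.foldl (fun d p => d.erase p) d).items = d.items.filter (fun q => !ks.contains q.1) := by
  induction ks with
  | nil => intro d; simp
  | cons k rest ih =>
    intro d
    rw [List.foldl_cons, ih]
    simp only [PySem.Dict.erase, List.filter_filter]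
    apply List.filter_congr
    intro q _
    rw [Bool.and_comm]
    by_cases hq : q.1 = k <;> simp [hq]

theorem pv_insert_accum (P : Int → Prop) [DecidablePred P] (g : Int → Int) (p : Int) :
    ∀ (ks : List Int) (d : PySem.Dict Int Int) (v : Int),
    ks.foldl (fun d k => if P k then d.insert p (d.getD p 0 + g k) else d) (d.insert p v)
      = d.insert p (v + ((ks.filter (fun k => decide (P k))).map g).sum) := by
  intro ks
  induction ks with
  | nil => intro d v; simp
  | cons k rest ih =>
    intro d v
    by_cases hk : P k
    · simp only [List.foldl_cons, if_pos hk, PySem.Dict.getD_insert_self, PySem.Dict.insert_insert_self]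
      rw [ih d (v + g k)]
      simp [hk, add_assoc]
    · simp only [List.foldl_cons, if_neg hk]
      rw [ih d v]
      simp [hk]

def pvS (l : List (Int × Int)) (p : Int) : Int :=
  ((l.filter (fun q => decide (q.1 > p))).map (fun q => q.2)).sum

theorem pvS_succ_list (b : Int) : ∀ (l : List (Int × Int)), (l.map Prod.fst).Nodup →
    pvS l b = pvS l (b + 1) + ((l.find? (fun q => q.1 == b + 1)).map Prod.snd).getD 0 := by
  intro l
  induction l with
  | nil => intro _; simp [pvS]
  | cons q rest ih =>
    intro h
    simp only [List.map_cons, List.nodup_cons] at h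
    obtain ⟨hq, hrest⟩ := h
    by_cases hk : q.1 = b + 1
    · have hfind : (q :: rest).find? (fun q => q.1 == b + 1) = some q := by
        simp [List.find?_cons, hk]
      rw [hfind]
      have h1 : pvS (q :: rest) b = q.2 + pvS rest b := by
        simp [pvS, List.filter_cons, hk]
      have h2 : pvS (q :: rest) (b + 1) = pvS rest (b + 1) := by
        simp [pvS, List.filter_cons, hk]
      have h3 : pvS rest b = pvS rest (b + 1) := by
        unfold pvS
        congr 1
        congr 1
        apply List.filter_congr
        intro x hx
        have : x.1 ≠ b + 1 := by
          intro hx1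
          have hm : x.1 ∈ rest.map Prod.fst := List.mem_map_of_mem hx
          rw [hx1, ← hk] at hm
          exact hq hm
        simp only [decide_eq_decide]
        omega
      rw [h1, h2, h3]; simp; ring_nf
    · have hfind : (q :: rest).find? (fun q => q.1 == b + 1)
          = rest.find? (fun q => q.1 == b + 1) := by
        simp [List.find?_cons, hk]
      rw [hfind]
      have hih := ih hrest
      by_cases hgt : q.1 > b
      · have hgt' : q.1 > b + 1 := by omega
        simp [pvS, List.filter_cons, hgt, hgt']
        simp [pvS] at hih
        omega
      · have hgt' : ¬ q.1 > b + 1 := by omega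
        simp [pvS, List.filter_cons, hgt, hgt']
        simp [pvS] at hih
        omega

theorem pv_S_succ (d : PySem.Dict Int Int) (h : d.keys.Nodup) (b : Int) :
    pvS d.items b = pvS d.items (b + 1) + d.getD (b + 1) 0 := by
  rw [pvS_succ_list b d.items h]
  rfl

-- ===== new =====

theorem pvA_inner_items (d : PySem.Dict Int Int) (h : d.keys.Nodup) (mn mx : Int) :
    (pvA_inner d mn mx).items
      = (PySem.List.pyRange mn mx 1).map (fun p => (p, pvS d.items p)) := by
  unfold pvA_inner
  have hstep : ∀ (cd : PySem.Dict Int Int) (p : Int),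
      d.keys.foldl
        (fun cd k => if k > p then cd.insert p (cd.getD p 0 + d.getD k 0) else cd)
        (cd.insert p 0)
      = cd.insert p (pvS d.items p) := by
    intro cd p
    rw [pv_insert_accum (fun k => k > p) (fun k => d.getD k 0) p d.keys cd 0]
    congr 1
    have hkeys : d.keys.filter (fun k => decide (k > p))
        = (d.items.filter (fun q => decide (q.1 > p))).map Prod.fst := by
      show (d.items.map Prod.fst).filter (fun k => decide (k > p)) = _
      rw [List.filter_map]
      rfl
    rw [hkeys, List.map_map]
    have hmap : (d.items.filter (fun q => decide (q.1 > p))).map ((fun k => d.getD k 0) ∘ Prod.fst)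
        = (d.items.filter (fun q => decide (q.1 > p))).map (fun q => q.2) := by
      apply List.map_congr_left
      intro q hq
      have hq' : q ∈ d.items := List.mem_of_mem_filter hq
      have : (q.1, q.2) ∈ d.items := by simpa using hq'
      simpa using PySem.Dict.getD_of_mem_items d this h 0
    rw [hmap]
    simp [pvS]
  rw [PySem.List.foldl_congr_mem (PySem.List.pyRange mn mx 1) _
    (fun cd p => cd.insert p (pvS d.items p)) _ (fun cd p _ => hstep cd p)]
  rw [PySem.Dict.items_foldl_insert_fresh (PySem.List.pyRange mn mx 1) (fun p => p)
    (fun p => pvS d.items p) _ (fun a _ => PySem.Dict.contains_empty _)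
    (by simpa using PySem.List.nodup_pyRange_one mn mx)]
  simp [PySem.Dict.empty]

theorem pv_pyRange_neg_snoc {a b : Int} (h : b < a) :
    PySem.List.pyRange a b (-1) = PySem.List.pyRange a (b + 1) (-1) ++ [b + 1] := by
  rw [PySem.List.pyRange_neg_one_eq_reverse a b, PySem.List.pyRange_one_cons (by omega : b + 1 < a + 1)]
  rw [List.reverse_cons, PySem.List.pyRange_neg_one_eq_reverse a (b + 1)]

theorem pvB_loop (d : PySem.Dict Int Int) (h : d.keys.Nodup) (dz : Bool) (a : Int) :
    ∀ (n : Nat) (b : Int), b = a - n → ∀ (rev : List (Int × Int)),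
    (PySem.List.pyRange a b (-1)).foldl
        (fun st p =>
          (if !dz || st.2 != 0 then st.1 ++ [(p, st.2)] else st.1,
           st.2 + d.getD p 0))
        (rev, pvS d.items a)
      = (rev ++ ((PySem.List.pyRange a b (-1)).map (fun p => (p, pvS d.items p))).filter
            (fun q => !dz || q.2 != 0),
         pvS d.items b) := by
  intro n
  induction n with
  | zero =>
    intro b hb rev
    have hb' : b = a := by push_cast at hb; omega
    subst hb'
    rw [PySem.List.pyRange_neg_one_eq_nil le_rfl]
    simp
  | succ n ih =>
    intro b hb rev
    have hlt : b < a := by omega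
    rw [pv_pyRange_neg_snoc hlt, List.foldl_append]
    rw [ih (b + 1) (by omega) rev]
    simp only [List.foldl_cons, List.foldl_nil, List.map_append, List.filter_append,
      List.map_cons, List.map_nil]
    rw [← pv_S_succ d h b]
    by_cases hz : (!dz || pvS d.items (b + 1) != 0) = true
    · simp [hz, List.append_assoc]
    · simp only [hz]
      simp at hz
      simp [List.filter_cons, hz]


theorem pvB_log_eq (d : PySem.Dict Int Int) (h : d.keys.Nodup) (mn mx : Int) (dz : Bool) :
    pvB_log d mn mx dz
      = ((PySem.List.pyRange mn mx 1).map (fun p => (p, pvS d.items p))).filter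
          (fun q => !dz || q.2 != 0) := by
  unfold pvB_log
  have hacc : ((d.items.filter (fun q => decide (q.1 ≥ mx))).map (fun q => q.2)).sum
      = pvS d.items (mx - 1) := by
    unfold pvS
    congr 2
    apply List.filter_congr
    intro q _
    simp only [decide_eq_decide]
    omega
  simp only [hacc]
  by_cases hc : mx ≤ mn
  · rw [PySem.List.pyRange_neg_one_eq_nil (by omega : mx - 1 ≤ mn - 1),
      PySem.List.pyRange_one_eq_nil hc]
    simp
  · rw [pvB_loop d h dz (mx - 1) (mx - mn).toNat (mn - 1) (by omega) []]
    simp only [List.nil_append]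
    rw [PySem.List.pyRange_neg_one_eq_reverse (mx - 1) (mn - 1)]
    have e1 : mn - 1 + 1 = mn := by omega
    have e2 : mx - 1 + 1 = mx := by omega
    rw [e1, e2, List.map_reverse, List.filter_reverse, List.reverse_reverse]


theorem pvA_delzero_items (cd : PySem.Dict Int Int) (h : cd.keys.Nodup) :
    (pvA_delzero cd).items = cd.items.filter (fun q => q.2 != 0) := by
  unfold pvA_delzero
  rw [show (fun acc p => if cd.getD p 0 == 0 then acc ++ [p] else acc)
      = (fun acc p => if (fun p => cd.getD p 0 == 0) p then acc ++ [(fun p => p) p] else acc) from rfl]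
  rw [PySem.List.foldl_append_if (fun p => cd.getD p 0 == 0) (fun p => p) cd.keys []]
  rw [pv_erase_fold]
  apply List.filter_congr
  intro q hq
  have hmem : (q.1, q.2) ∈ cd.items := by simpa using hq
  have hget : cd.getD q.1 0 = q.2 := PySem.Dict.getD_of_mem_items cd hmem h 0
  have hk : q.1 ∈ cd.keys := by
    simp [PySem.Dict.keys]
    exact ⟨q.2, hmem⟩
  by_cases hz : q.2 = 0 <;> simp [hk, hget, hz]

theorem pv_update_each (g : PySem.Dict Int Int → PySem.Dict Int Int) :
    ∀ (ks : List String) (c : PySem.Dict String (PySem.Dict Int Int)),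
    c.keys.Nodup → ks.Nodup → (∀ k ∈ ks, k ∈ c.keys) →
    (ks.foldl (fun c n => c.insert n (g (c.getD n PySem.Dict.empty))) c).items
      = c.items.map (fun q => if q.1 ∈ ks then (q.1, g q.2) else q) := by
  intro ks
  induction ks with
  | nil => intro c _ _ _; simp
  | cons k rest ih =>
    intro c hc hks hmem
    have hkc : k ∈ c.keys := hmem k (by simp)
    have hcont : c.contains k = true := (PySem.Dict.contains_iff_mem_keys c k).mpr hkc
    rw [List.foldl_cons]
    have hitems : (c.insert k (g (c.getD k PySem.Dict.empty))).items
        = c.items.map (fun q => if q.1 = k then (q.1, g q.2) else q) := by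
      rw [PySem.Dict.items_insert_of_contains c _ hcont]
      apply List.map_congr_left
      intro p hp
      by_cases hpk : p.1 = k
      · have hmemp : (k, p.2) ∈ c.items := by rw [← hpk]; simpa using hp
        have : c.getD k PySem.Dict.empty = p.2 := PySem.Dict.getD_of_mem_items c hmemp hc _
        simp [hpk, this]
      · simp [hpk]
    have hkeys : (c.insert k (g (c.getD k PySem.Dict.empty))).keys = c.keys := by
      show ((c.insert k (g (c.getD k PySem.Dict.empty))).items).map Prod.fst = (c.items).map Prod.fst
      rw [hitems, List.map_map]
      apply List.map_congr_left
      intro p _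
      by_cases hpk : p.1 = k <;> simp [hpk]
    rw [List.nodup_cons] at hks
    rw [ih _ (by rw [hkeys]; exact hc) hks.2
      (by intro x hx; rw [hkeys]; exact hmem x (by simp [hx]))]
    rw [hitems, List.map_map]
    apply List.map_congr_left
    intro p _
    by_cases hpk : p.1 = k
    · have : k ∉ rest := hks.1
      simp [hpk, this]
    · by_cases hpr : p.1 ∈ rest <;> simp [hpk, hpr]

theorem pvS_perm {l1 l2 : List (Int × Int)} (h : l1.Perm l2) (p : Int) : pvS l1 p = pvS l2 p := by
  unfold pvS
  exact ((h.filter _).map _).sum_eq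

theorem pv_log_eq (dl : List (Int × Int)) (mn mx : Int) (dz : Bool) :
    (if dz then pvA_delzero (pvA_inner (PySem.Dict.ofList
        (PySem.List.sorted2 (PySem.Dict.ofList dl).items (fun q => q.1) (fun q => q.2))) mn mx)
      else pvA_inner (PySem.Dict.ofList
        (PySem.List.sorted2 (PySem.Dict.ofList dl).items (fun q => q.1) (fun q => q.2))) mn mx).items
      = (PySem.Dict.ofList (pvB_log (PySem.Dict.ofList dl) mn mx dz)).items := by
  have hn0 : (PySem.Dict.ofList dl).keys.Nodup := PySem.Dict.nodup_keys_ofList dl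
  have hperm : (PySem.List.sorted2 (PySem.Dict.ofList dl).items (fun q => q.1) (fun q => q.2)).Perm
      (PySem.Dict.ofList dl).items :=
    PySem.List.sorted2_perm _ _ _ _
  have hnodupS : ((PySem.List.sorted2 (PySem.Dict.ofList dl).items
      (fun q => q.1) (fun q => q.2)).map Prod.fst).Nodup :=
    ((hperm.map Prod.fst).nodup_iff).mpr hn0
  have hld_items : (PySem.Dict.ofList (PySem.List.sorted2 (PySem.Dict.ofList dl).items
      (fun q => q.1) (fun q => q.2))).items
      = PySem.List.sorted2 (PySem.Dict.ofList dl).items (fun q => q.1) (fun q => q.2) :=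
    pv_ofList_items _ hnodupS
  have hld_keys : (PySem.Dict.ofList (PySem.List.sorted2 (PySem.Dict.ofList dl).items
      (fun q => q.1) (fun q => q.2))).keys.Nodup := by
    show ((PySem.Dict.ofList _).items.map Prod.fst).Nodup
    rw [hld_items]; exact hnodupS
  have hA : (pvA_inner (PySem.Dict.ofList (PySem.List.sorted2 (PySem.Dict.ofList dl).items
      (fun q => q.1) (fun q => q.2))) mn mx).items
      = (PySem.List.pyRange mn mx 1).map (fun p => (p, pvS (PySem.Dict.ofList dl).items p)) := by
    rw [pvA_inner_items _ hld_keys]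
    apply List.map_congr_left
    intro p _
    rw [hld_items, pvS_perm hperm]
  have hAkeys : (pvA_inner (PySem.Dict.ofList (PySem.List.sorted2 (PySem.Dict.ofList dl).items
      (fun q => q.1) (fun q => q.2))) mn mx).keys.Nodup := by
    show ((pvA_inner _ _ _).items.map Prod.fst).Nodup
    rw [hA, List.map_map]
    simpa [Function.comp_def] using PySem.List.nodup_pyRange_one mn mx
  have hB := pvB_log_eq (PySem.Dict.ofList dl) hn0 mn mx dz
  have hBnodup : ((pvB_log (PySem.Dict.ofList dl) mn mx dz).map Prod.fst).Nodup := by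
    rw [hB]
    have hsub : (((PySem.List.pyRange mn mx 1).map
          (fun p => (p, pvS (PySem.Dict.ofList dl).items p))).filter
          (fun q => !dz || q.2 != 0)).Sublist
        ((PySem.List.pyRange mn mx 1).map (fun p => (p, pvS (PySem.Dict.ofList dl).items p))) :=
      List.filter_sublist
    have := (hsub.map Prod.fst).nodup
    apply this
    rw [List.map_map]
    simpa [Function.comp_def] using PySem.List.nodup_pyRange_one mn mx
  rw [pv_ofList_items _ hBnodup, hB]
  cases dz with
  | false =>
    rw [if_neg (by simp)]
    rw [hA]
    have : (fun (q : Int × Int) => !false || q.2 != 0) = fun _ => true := by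
      funext q; simp
    rw [this, List.filter_true]
  | true =>
    rw [if_pos rfl]
    rw [pvA_delzero_items _ hAkeys, hA]
    apply List.filter_congr
    intro q _
    simp

-- ===== VERDICT (by name: the statement is the Claim_ definition above) =====
theorem count_nb_traces_longer_than_prefix_spec : Claim_equal_count_nb_traces_longer_than_prefix := by
  intro tl mn mx dz _
  unfold Spec_count_nb_traces_longer_than_prefix
  simp only [count_nb_traces_longer_than_prefix, count_nb_traces_longer_than_prefix_alt]
  have hnd : ((PySem.Dict.ofList tl).items.map (fun (it : String × List (Int × Int)) => it.1)).Nodup :=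
    PySem.Dict.nodup_keys_ofList tl
  have hcA : ((PySem.Dict.ofList tl).items.foldl
      (fun counts it => counts.insert it.1 (pvA_inner (PySem.Dict.ofList
        (PySem.List.sorted2 (PySem.Dict.ofList it.2).items (fun q => q.1) (fun q => q.2))) mn mx))
      PySem.Dict.empty).items
      = (PySem.Dict.ofList tl).items.map (fun it => (it.1, pvA_inner (PySem.Dict.ofList
        (PySem.List.sorted2 (PySem.Dict.ofList it.2).items (fun q => q.1) (fun q => q.2))) mn mx)) := by
    rw [PySem.Dict.items_foldl_insert_fresh (β := String × List (Int × Int))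
      ((PySem.Dict.ofList tl).items) (fun it => it.1)
      (fun it => pvA_inner (PySem.Dict.ofList
        (PySem.List.sorted2 (PySem.Dict.ofList it.2).items (fun q => q.1) (fun q => q.2))) mn mx)
      PySem.Dict.empty (fun a _ => PySem.Dict.contains_empty _) hnd]
    simp [PySem.Dict.empty]
  have hcB : ((PySem.Dict.ofList tl).items.foldl
      (fun counts it => counts.insert it.1
        (PySem.Dict.ofList (pvB_log (PySem.Dict.ofList it.2) mn mx dz)))
      PySem.Dict.empty).items
      = (PySem.Dict.ofList tl).items.map (fun it => (it.1,
        PySem.Dict.ofList (pvB_log (PySem.Dict.ofList it.2) mn mx dz))) := by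
    rw [PySem.Dict.items_foldl_insert_fresh (β := String × List (Int × Int))
      ((PySem.Dict.ofList tl).items) (fun it => it.1)
      (fun it => PySem.Dict.ofList (pvB_log (PySem.Dict.ofList it.2) mn mx dz))
      PySem.Dict.empty (fun a _ => PySem.Dict.contains_empty _) hnd]
    simp [PySem.Dict.empty]
  cases dz with
  | false =>
    rw [if_neg (by simp)]
    rw [hcA, hcB, List.map_map, List.map_map]
    apply List.map_congr_left
    intro it _
    have := pv_log_eq it.2 mn mx false
    rw [if_neg (by simp)] at this
    simpa using congrArg (Prod.mk it.1) this
  | true =>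
    rw [if_pos rfl]
    have hckeys : ((PySem.Dict.ofList tl).items.foldl
        (fun counts it => counts.insert it.1 (pvA_inner (PySem.Dict.ofList
          (PySem.List.sorted2 (PySem.Dict.ofList it.2).items (fun q => q.1) (fun q => q.2))) mn mx))
        PySem.Dict.empty).keys
        = (PySem.Dict.ofList tl).items.map (fun it => it.1) := by
      show (PySem.Dict.items (List.foldl
          (fun counts it => counts.insert it.1 (pvA_inner (PySem.Dict.ofList
            (PySem.List.sorted2 (PySem.Dict.ofList it.2).items (fun q => q.1) (fun q => q.2))) mn mx))
          PySem.Dict.empty (PySem.Dict.ofList tl).items)).map (fun x => x.1) = _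
      rw [hcA, List.map_map]
      simp [Function.comp_def]
    rw [pv_update_each pvA_delzero _ _ (by rw [hckeys]; exact hnd)
      (by rw [hckeys]; exact hnd) (fun k hk => hk)]
    rw [hcA, hcB, List.map_map, List.map_map, List.map_map]
    apply List.map_congr_left
    intro it hit
    have hmem : (fun (it : String × List (Int × Int)) => (it.1, pvA_inner (PySem.Dict.ofList
        (PySem.List.sorted2 (PySem.Dict.ofList it.2).items (fun q => q.1) (fun q => q.2))) mn mx)) it
        ∈ (PySem.Dict.ofList tl).items.map (fun it => (it.1, pvA_inner (PySem.Dict.ofList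
          (PySem.List.sorted2 (PySem.Dict.ofList it.2).items (fun q => q.1) (fun q => q.2))) mn mx)) :=
      List.mem_map_of_mem hit
    have hin : it.1 ∈ ((PySem.Dict.ofList tl).items.foldl
        (fun counts it => counts.insert it.1 (pvA_inner (PySem.Dict.ofList
          (PySem.List.sorted2 (PySem.Dict.ofList it.2).items (fun q => q.1) (fun q => q.2))) mn mx))
        PySem.Dict.empty).keys := by
      rw [hckeys]
      exact List.mem_map_of_mem hit
    simp only [Function.comp_apply, if_pos hin]
    have := pv_log_eq it.2 mn mx true
    rw [if_pos rfl] at this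
    simpa using congrArg (Prod.mk it.1) this
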